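-- pv_equiv track=rewrite | github.com/isaacyoung/jwcoding | model/columnutils.py | get_java_get_method_name
-- ===== SOURCE A (Python) =====
-- def get_java_get_method_name(column):
--     temp = column.lower()
--     if temp.find('_') != -1:
--         temp = temp.split('_')
--         result = []
--         for s in temp:
--             result.append(s.capitalize())
--
--         return 'get' + ''.join(result)
--     else:
--         return temp
-- ===== SOURCE B (Python) =====
-- def get_java_get_method_name(column):
--     temp = column.lower()
--     if '_' in temp:
--         out = []
--         cap = True
--         for ch in temp:
--             if ch == '_':
--                 cap = True
--             elif cap:
--                 out.append(ch.upper())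
--                 cap = False
--             else:
--                 out.append(ch)
--         return 'get' + ''.join(out)
--     else:
--         return temp
-- ===== Notes on version B (the rewrite author's own statement) =====
-- stated objective: simpler
-- what changed: Replaces the split-on-underscore / capitalize-each-segment / join list pipeline by a single pass over the lowered string carrying a capitalize-next flag, so no intermediate segment lists are built.
import Mathlib
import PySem

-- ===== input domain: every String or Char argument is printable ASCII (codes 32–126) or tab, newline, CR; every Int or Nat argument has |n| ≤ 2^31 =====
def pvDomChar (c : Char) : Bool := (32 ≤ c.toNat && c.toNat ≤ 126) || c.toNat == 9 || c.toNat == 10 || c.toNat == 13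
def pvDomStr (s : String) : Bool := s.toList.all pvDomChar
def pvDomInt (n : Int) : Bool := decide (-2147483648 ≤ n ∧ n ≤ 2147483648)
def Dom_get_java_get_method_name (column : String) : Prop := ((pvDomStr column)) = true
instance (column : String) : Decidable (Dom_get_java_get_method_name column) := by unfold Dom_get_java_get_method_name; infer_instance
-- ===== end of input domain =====

-- B replaces A's split/capitalize/join pipeline by a single pass over the lowered
-- string carrying a capitalize-next flag (same O(n) cost, simpler decomposition).


-- ===== PORT A =====
-- s.capitalize() for an ASCII string: first char uppercased, rest lowercased (exact on the ASCII domain)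
def pvCapitalize (cs : List Char) : List Char :=
  match cs with
  | [] => []
  | c :: rest => PySem.Chars.upperChar c :: PySem.Chars.lower rest

def get_java_get_method_name (column : String) : String :=
  let temp := (PySem.Str.lower column).toList
  if PySem.Chars.find temp ['_'] ≠ -1 then
    let parts := PySem.Chars.splitOn temp ['_']
    let result := parts.foldl (fun acc s => acc ++ [pvCapitalize s]) []
    String.ofList (['g', 'e', 't'] ++ PySem.Chars.join [] result)
  else
    String.ofList temp

-- ===== PORT B =====
-- the character loop of Source B: '_' sets the flag; otherwise emit (uppercased if flag set)
def pvAltLoop : List Char → Bool → List Char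
  | [], _ => []
  | c :: rest, cap =>
    if c = '_' then pvAltLoop rest true
    else if cap then PySem.Chars.upperChar c :: pvAltLoop rest false
    else c :: pvAltLoop rest false

def get_java_get_method_name_alt (column : String) : String :=
  let temp := (PySem.Str.lower column).toList
  if PySem.Chars.isIn ['_'] temp then
    String.ofList (['g', 'e', 't'] ++ pvAltLoop temp true)
  else
    String.ofList temp

-- ===== PRECONDITION & SPEC =====
def Spec_get_java_get_method_name (column : String) (out : String) : Prop := out = get_java_get_method_name_alt column
instance (column : String) (out : String) : Decidable (Spec_get_java_get_method_name column out) := by unfold Spec_get_java_get_method_name; infer_instance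

-- ===== CLAIM (what is proved, stated in full; the proofs are below) =====
def Claim_equal_get_java_get_method_name : Prop := ∀ (column : String), Dom_get_java_get_method_name column → Spec_get_java_get_method_name column (get_java_get_method_name column)

-- ===== LEMMAS AND PROOFS =====

-- proof-side view of splitting on '_' with a reversed current-segment accumulator
def pvSegs : List Char → List Char → List (List Char)
  | [], cur => [cur.reverse]
  | c :: rest, cur => if c = '_' then cur.reverse :: pvSegs rest [] else pvSegs rest (c :: cur)

theorem pv_toNat_ofNat_small (n : Nat) (h : n < 55296) : (Char.ofNat n).toNat = n := by
  have hv : Nat.isValidChar n := Or.inl h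
  rw [Char.ofNat, dif_pos hv]
  simp [Char.ofNatAux, Char.toNat]

theorem pv_lowerChar_idem (c : Char) :
    PySem.Chars.lowerChar (PySem.Chars.lowerChar c) = PySem.Chars.lowerChar c := by
  unfold PySem.Chars.lowerChar PySem.Chars.isupper
  by_cases h : 'A' ≤ c ∧ c ≤ 'Z'
  · have h1 : 65 ≤ c.toNat ∧ c.toNat ≤ 90 := by
      obtain ⟨ha, hb⟩ := h
      simp only [Char.le_def, UInt32.le_iff_toNat_le] at ha hb
      exact ⟨ha, hb⟩
    have hv : (Char.ofNat (c.toNat + 32)).toNat = c.toNat + 32 :=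
      pv_toNat_ofNat_small _ (by omega)
    simp only [h.1, h.2, decide_true, Bool.and_self, if_true]
    have hno : ¬ (Char.ofNat (c.toNat + 32) ≤ 'Z') := by
      simp only [Char.le_def, UInt32.le_iff_toNat_le]
      show ¬ ((Char.ofNat (c.toNat + 32)).toNat ≤ ('Z').toNat)
      have hz : ('Z').toNat = 90 := rfl
      rw [hv, hz]; omega
    simp [hno]
  · rcases not_and_or.mp h with h' | h' <;> simp [h']

theorem pv_go_eq (fuel : Nat) :
    ∀ (l cur : List Char) (accs : List (List Char)), l.length < fuel →
      PySem.Chars.splitOn.go ['_'] fuel l cur accs = accs.reverse ++ pvSegs l cur := by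
  induction fuel with
  | zero => intro l cur accs h; omega
  | succ n ih =>
    intro l cur accs h
    cases l with
    | nil => simp [PySem.Chars.splitOn.go, pvSegs]
    | cons c rest =>
      by_cases hc : c = '_'
      · subst hc
        simp only [PySem.Chars.splitOn.go, List.isPrefixOf, beq_self_eq_true, Bool.true_and,
          if_true, List.length_cons, List.drop_succ_cons]
        simp only [List.length_nil, List.drop_zero]
        rw [ih rest [] (List.reverse cur :: accs) (by simpa using Nat.lt_of_succ_lt_succ h)]
        simp [pvSegs]
      · simp only [PySem.Chars.splitOn.go, List.isPrefixOf, Bool.and_eq_true, beq_iff_eq]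
        rw [if_neg (by simp; exact fun h => absurd h.symm hc)]
        rw [ih rest (c :: cur) accs (by simpa using Nat.lt_of_succ_lt_succ h)]
        simp [pvSegs, hc]

theorem pv_splitOn_eq (cs : List Char) :
    PySem.Chars.splitOn cs ['_'] = pvSegs cs [] := by
  unfold PySem.Chars.splitOn
  rw [pv_go_eq (cs.length + 1) cs [] [] (by omega)]
  simp

theorem pv_jflat (l : List (List Char)) : PySem.Chars.join [] l = l.flatten := by
  unfold PySem.Chars.join List.intercalate
  induction l with
  | nil => simp
  | cons x xs ih =>
    cases xs with
    | nil => simp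
    | cons y ys => simp_all [List.intersperse]

theorem pv_capit_append (xs : List Char) (c : Char) (hxs : xs ≠ [])
    (hfix : ∀ d ∈ xs, PySem.Chars.lowerChar d = d) (hc : PySem.Chars.lowerChar c = c) :
    pvCapitalize (xs ++ [c]) = pvCapitalize xs ++ [c] := by
  cases xs with
  | nil => exact absurd rfl hxs
  | cons d ds =>
    simp [pvCapitalize, PySem.Chars.lower, hc]

theorem pv_seg_loop (cs : List Char) (hcs : ∀ c ∈ cs, PySem.Chars.lowerChar c = c) :
    ∀ cur, (∀ c ∈ cur, PySem.Chars.lowerChar c = c) →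
      ((pvSegs cs cur).map pvCapitalize).flatten =
        (if cur = [] then pvAltLoop cs true else pvCapitalize cur.reverse ++ pvAltLoop cs false) := by
  induction cs with
  | nil =>
    intro cur hcur
    by_cases h : cur = []
    · subst h; simp [pvSegs, pvCapitalize, pvAltLoop]
    · simp [pvSegs, pvAltLoop, h]
  | cons c rest ih =>
    intro cur hcur
    have hc : PySem.Chars.lowerChar c = c := hcs c (by simp)
    have hrest : ∀ d ∈ rest, PySem.Chars.lowerChar d = d := fun d hd => hcs d (by simp [hd])
    by_cases hund : c = '_'
    · subst hund
      have := ih hrest [] (by simp)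
      by_cases h : cur = []
      · subst h; simp_all [pvSegs, pvAltLoop, pvCapitalize]
      · simp_all [pvSegs, pvAltLoop]
    · have hcur' : ∀ d ∈ (c :: cur), PySem.Chars.lowerChar d = d := by
        intro d hd
        rcases List.mem_cons.mp hd with h | h
        · subst h; exact hc
        · exact hcur d h
      have hIH := ih hrest (c :: cur) hcur'
      by_cases h : cur = []
      · subst h
        simp only [pvSegs, if_neg hund] at *
        rw [hIH]
        simp only [if_neg (by simp : ([c] : List Char) ≠ []), List.reverse_cons, List.reverse_nil,
          List.nil_append]
        simp [pvAltLoop, hund, pvCapitalize, PySem.Chars.lower]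
      · simp only [pvSegs, if_neg hund] at *
        rw [hIH]
        simp only [if_neg (by simp : (c :: cur) ≠ []), List.reverse_cons]
        rw [pv_capit_append cur.reverse c (by simpa using h)
          (fun d hd => hcur d (List.mem_reverse.mp hd)) hc]
        simp [pvAltLoop, hund, h]

theorem pv_lower_all_fixed (l : List Char) :
    ∀ c ∈ PySem.Chars.lower l, PySem.Chars.lowerChar c = c := by
  intro c hcl
  unfold PySem.Chars.lower at hcl
  rcases List.mem_map.mp hcl with ⟨d, _, rfl⟩
  exact pv_lowerChar_idem d

-- ===== VERDICT (by name: the statement is the Claim_ definition above) =====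
theorem get_java_get_method_name_spec : Claim_equal_get_java_get_method_name := by
  intro column _
  unfold Spec_get_java_get_method_name get_java_get_method_name get_java_get_method_name_alt
  set temp := (PySem.Str.lower column).toList with htemp
  by_cases h : ['_'] <:+: temp
  · rw [if_pos ((PySem.Chars.find_ne_neg_one_iff _ _).mpr h),
        if_pos ((PySem.Chars.isIn_iff_infix _ _).mpr h)]
    have hall : ∀ c ∈ temp, PySem.Chars.lowerChar c = c := by
      rw [htemp, PySem.Str.toList_lower]
      exact pv_lower_all_fixed _
    dsimp only
    rw [PySem.List.foldl_append_singleton_eq_map, pv_jflat, pv_splitOn_eq]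
    have hseg := pv_seg_loop temp hall [] (by simp)
    simp only [if_true, List.nil_append] at hseg ⊢
    rw [hseg]
  · rw [if_neg (by simpa using (PySem.Chars.find_eq_neg_one_iff _ _).mpr h),
        if_neg (by simpa using (PySem.Chars.isIn_eq_false_iff _ _).mpr h)]
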